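-- pv_equiv track=rewrite | github.com/liboyin/algo-prac | mathematics/palindromic_num.py | next_palindromic
-- ===== SOURCE A (Python) =====
-- from math import floor, log10
--
-- def is_palindromic(x):
--     if x < 0:  # negative numbers are not palindromic by definition
--         return False
--     if 0 <= x < 10:
--         return True
--     left = int(10 ** floor(log10(x)))  # 999 -> 100; 1000 -> 1000
--     right = 1
--     while left >= right:
--         if x // left % 10 != x // right % 10:
--             return False
--         left //= 10
--         right *= 10
--     return True
--
-- def next_palindromic(x):
--     """
--     Returns the next greater palindromic number of a given integer.
--     Observation:
--     Case 0: (-inf, 8]: next positive number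
--     Case 1: 10 ^ k - 1 -> 10 ^ k + 1. e.g. 999 -> 1001
--     Case 2: If x is palindromic, increase the middle digit (odd n) or the last digit of the left half (even n) by 1,
--         then copy the left half to the right in reversed order. e.g. 1234 -> 1331
--     Case 3. Otherwise, try to copy the left half to the right in reversed order. If the result is smaller than x, follow
--         case 2. e.g. 1234 -> 1331
--     :param x: int
--     :return: int
--     """
--     def copy_to_right(x):
--         for i in range(m):
--             x -= x // (10 ** i) % 10 * (10 ** i)
--             x += x // (10 ** (n - 1 - i)) % 10 * (10 ** i)
--         return x
--     if x < 9:  # case 0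
--         return max(-1, x) + 1
--     if floor(log10(x+1)) == log10(x+1):  # case 1
--         return x + 2
--     n = floor(log10(x)) + 1  # number of digits. 121 -> 3; 1221 -> 4
--     m = n // 2
--     if is_palindromic(x):  # case 2
--         x += 10 ** m
--         if x // (10 ** m) % 10 == 0:  # the increase caused a carry-over
--             x = copy_to_right(x)
--         elif n % 2 == 0:  # no carry-over, even length
--             x += 10 ** (m - 1)
--         return x  # no carry-over + odd length requires no copying
--     y = copy_to_right(x)  # case 3
--     if y > x:
--         return y
--     return copy_to_right(x + 10 ** m)  # increase middle digit, copy to right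
-- ===== SOURCE B (Python) =====
-- def _pal(h, n):
--     # palindrome of length n whose leading (n+1)//2 digits are those of h
--     r, t = 0, h // (10 ** (n % 2))  # drop the middle digit when n is odd
--     for _ in range(n // 2):
--         r = r * 10 + t % 10
--         t //= 10
--     return h * 10 ** (n // 2) + r
--
--
-- def next_palindromic(x):
--     if x < 0:
--         return 0
--     n, t = 1, x  # count decimal digits
--     while t >= 10:
--         t //= 10
--         n += 1
--     half = x // 10 ** (n // 2)  # left half, middle digit included
--     cand = _pal(half, n)
--     if cand > x:
--         return cand
--     if half + 1 == 10 ** ((n + 1) // 2):  # left half was all nines: grow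
--         return 10 ** n + 1
--     return _pal(half + 1, n)
-- ===== Notes on version B (the rewrite author's own statement) =====
-- stated objective: alternative
-- what changed: Replaces A's four-way case analysis (float log10 power-of-ten test, palindromicity scan, in-place digit surgery copy_to_right with separate carry/even/odd middle-digit handling) by the standard mirror-the-left-half algorithm: take the left half including the middle digit, mirror it into a candidate palindrome, and if the candidate is not greater, increment the half (growing to 10^n+1 when it was all nines) and mirror again.
import Mathlib
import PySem

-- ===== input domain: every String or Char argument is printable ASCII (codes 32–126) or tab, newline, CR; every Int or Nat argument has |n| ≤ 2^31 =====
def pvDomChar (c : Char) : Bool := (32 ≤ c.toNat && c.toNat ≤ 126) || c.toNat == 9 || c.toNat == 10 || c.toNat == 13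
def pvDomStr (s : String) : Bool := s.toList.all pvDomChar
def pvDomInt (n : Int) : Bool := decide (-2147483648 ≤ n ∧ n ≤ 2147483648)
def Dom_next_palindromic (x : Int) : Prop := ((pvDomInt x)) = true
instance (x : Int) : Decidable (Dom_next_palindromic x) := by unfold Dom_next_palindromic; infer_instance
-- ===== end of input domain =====

-- B replaces A's case analysis (log10 power-of-ten test, palindromicity scan, in-place
-- digit surgery with carry/even/odd middle handling) by the standard algorithm: mirror
-- the left half, and if the candidate is not greater, increment the half and mirror again.

-- ===== PORT A =====

-- termination measure for the division-by-10 loops (cited by name in decreasing_by)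
theorem pvFdiv10_toNat_lt (x : Int) (h : 1 ≤ x) : (PySem.Int.floordiv x 10).toNat < x.toNat := by
  rw [PySem.Int.floordiv_eq_ediv_of_pos (by norm_num)]
  omega


-- floor(log10(x)) for x ≥ 1, computed exactly by repeated division
-- (exact for the integers A applies it to; Python's float log10 is exact on |x| ≤ 2^31).
def pvFloorLog10 (x : Int) : Int :=
  if _h : x < 10 then 0
  else pvFloorLog10 (PySem.Int.floordiv x 10) + 1
termination_by x.toNat
decreasing_by exact pvFdiv10_toNat_lt x (by omega)

-- the while-loop of is_palindromic; the conjunct '1 ≤ right' is a totality guard only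
-- (right starts at 1 and is only ever multiplied by 10, so it holds on every reachable call)
def pvIpLoop (x left right : Int) : Bool :=
  if _h : 1 ≤ right ∧ right ≤ left then
    if PySem.Int.mod (PySem.Int.floordiv x left) 10 ≠ PySem.Int.mod (PySem.Int.floordiv x right) 10 then
      false
    else pvIpLoop x (PySem.Int.floordiv left 10) (right * 10)
  else true
termination_by left.toNat
decreasing_by exact pvFdiv10_toNat_lt left (by omega)

def is_palindromic (x : Int) : Bool :=
  if x < 0 then false
  else if 0 ≤ x ∧ x < 10 then true
  else pvIpLoop x (10 ^ (pvFloorLog10 x).toNat) 1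

-- copy_to_right: the closure's free variables n, m are explicit parameters here
def pvCopyToRight (n m x : Int) : Int :=
  (PySem.List.pyRange 0 m 1).foldl
    (fun acc i =>
      let acc := acc - PySem.Int.mod (PySem.Int.floordiv acc (10 ^ i.toNat)) 10 * 10 ^ i.toNat
      acc + PySem.Int.mod (PySem.Int.floordiv acc (10 ^ (n - 1 - i).toNat)) 10 * 10 ^ i.toNat)
    x

def next_palindromic (x : Int) : Int :=
  if x < 9 then max (-1) x + 1
  -- floor(log10(x+1)) == log10(x+1) holds exactly when x+1 is a power of 10
  else if 10 ^ (pvFloorLog10 (x + 1)).toNat = x + 1 then x + 2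
  else
    let n : Int := pvFloorLog10 x + 1
    let m : Int := PySem.Int.floordiv n 2
    if is_palindromic x then
      let x' := x + 10 ^ m.toNat
      if PySem.Int.mod (PySem.Int.floordiv x' (10 ^ m.toNat)) 10 = 0 then
        pvCopyToRight n m x'
      else if PySem.Int.mod n 2 = 0 then x' + 10 ^ (m - 1).toNat
      else x'
    else
      let y := pvCopyToRight n m x
      if y > x then y
      else pvCopyToRight n m (x + 10 ^ m.toNat)

-- ===== PORT B =====

-- _pal(h, n): r, t = 0, h // 10**(n % 2); then n//2 steps of r, t = r*10 + t%10, t//10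
def pvPal (h n : Int) : Int :=
  let t0 := PySem.Int.floordiv h (10 ^ (PySem.Int.mod n 2).toNat)
  let p := (List.range (PySem.Int.floordiv n 2).toNat).foldl
    (fun (rt : Int × Int) _ => (rt.1 * 10 + PySem.Int.mod rt.2 10, PySem.Int.floordiv rt.2 10))
    (0, t0)
  h * 10 ^ (PySem.Int.floordiv n 2).toNat + p.1

-- the digit-counting while loop of B
def pvDigits (t : Int) : Int :=
  if _h : t < 10 then 1
  else pvDigits (PySem.Int.floordiv t 10) + 1
termination_by t.toNat
decreasing_by exact pvFdiv10_toNat_lt t (by omega)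

def next_palindromic_alt (x : Int) : Int :=
  if x < 0 then 0
  else
    let n := pvDigits x
    let half := PySem.Int.floordiv x (10 ^ (PySem.Int.floordiv n 2).toNat)
    let cand := pvPal half n
    if cand > x then cand
    else if half + 1 = 10 ^ (PySem.Int.floordiv (n + 1) 2).toNat then 10 ^ n.toNat + 1
    else pvPal (half + 1) n

-- ===== PRECONDITION & SPEC =====
def Spec_next_palindromic (x : Int) (out : Int) : Prop := out = next_palindromic_alt x
instance (x : Int) (out : Int) : Decidable (Spec_next_palindromic x out) := by unfold Spec_next_palindromic; infer_instance

-- ===== CLAIM (what is proved, stated in full; the proofs are below) =====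
def Claim_equal_next_palindromic : Prop := ∀ (x : Int), Dom_next_palindromic x → Spec_next_palindromic x (next_palindromic x)

-- ===== LEMMAS AND PROOFS =====

-- reversal of the last m digits of t (head digit of t becomes high digit of the result)
def revSpec : Nat → Int → Int
  | 0, _ => 0
  | m + 1, t => revSpec m t * 10 + t / 10 ^ m % 10

theorem revSpec_cons (m : Nat) (t : Int) :
    revSpec (m + 1) t = (t % 10) * 10 ^ m + revSpec m (t / 10) := by
  induction m generalizing t with
  | zero => simp [revSpec]
  | succ m ih =>
    rw [show m + 1 + 1 = (m + 1) + 1 from rfl, revSpec, ih, revSpec]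
    have : t / 10 ^ (m + 1) = t / 10 / 10 ^ m := by
      rw [Int.ediv_ediv_eq_ediv_mul (by norm_num), pow_succ']
    rw [this]; ring

theorem revSpec_nonneg (m : Nat) (t : Int) (_ht : 0 ≤ t) : 0 ≤ revSpec m t := by
  induction m with
  | zero => simp [revSpec]
  | succ m ih =>
    have h1 : 0 ≤ t / 10 ^ m % 10 := Int.emod_nonneg _ (by positivity)
    simp only [revSpec]; positivity

theorem revSpec_lt (m : Nat) (t : Int) (_ht : 0 ≤ t) : revSpec m t < 10 ^ m := by
  induction m with
  | zero => simp [revSpec]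
  | succ m ih =>
    have h1 : t / 10 ^ m % 10 < 10 := Int.emod_lt_of_pos _ (by norm_num)
    simp only [revSpec, pow_succ]
    nlinarith [revSpec_nonneg m t _ht]

-- t / 10^a / 10^b = t / 10^(a+b)
theorem ediv_pow_pow (t : Int) (a b : Nat) : t / 10 ^ a / 10 ^ b = t / 10 ^ (a + b) := by
  rw [Int.ediv_ediv_eq_ediv_mul (by positivity), pow_add]

theorem ediv_ten_pow (t : Int) (j : Nat) : t / 10 / 10 ^ j = t / 10 ^ (j + 1) := by
  rw [Int.ediv_ediv_eq_ediv_mul (by norm_num), ← pow_succ']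

-- (A * 10^p + r) / 10^j splits when j ≤ p
theorem div_split (A r : Int) (p j : Nat) (hj : j ≤ p) :
    (A * 10 ^ p + r) / 10 ^ j = A * 10 ^ (p - j) + r / 10 ^ j := by
  have hsplit : (A:Int) * 10 ^ p = A * 10 ^ (p - j) * 10 ^ j := by
    rw [mul_assoc, ← pow_add]; congr 2; omega
  rw [hsplit, add_comm, Int.add_mul_ediv_right _ _ (by positivity : (10:Int) ^ j ≠ 0)]
  ring

-- digits below position p of A * 10^p + r are the digits of r
theorem dig_low (A r : Int) (p j : Nat) (hj : j < p) :
    (A * 10 ^ p + r) / 10 ^ j % 10 = r / 10 ^ j % 10 := by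
  rw [div_split A r p j (by omega)]
  have : (10:Int) ^ (p - j) = 10 * 10 ^ (p - j - 1) := by
    rw [← pow_succ']; congr 1; omega
  rw [this, show A * (10 * 10 ^ (p - j - 1)) + r / 10 ^ j
        = r / 10 ^ j + 10 * (A * 10 ^ (p - j - 1)) from by ring,
      Int.add_mul_emod_self_left]

-- dividing A * 10^p + r (0 ≤ r < 10^p) by 10^q, p ≤ q, kills r
theorem div_high (A r : Int) (p q : Nat) (hr : 0 ≤ r) (hrp : r < 10 ^ p) (hpq : p ≤ q) :
    (A * 10 ^ p + r) / 10 ^ q = A / 10 ^ (q - p) := by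
  have h1 : (A * 10 ^ p + r) / 10 ^ p = A := by
    rw [add_comm, Int.add_mul_ediv_right _ _ (by positivity : (10:Int) ^ p ≠ 0),
        Int.ediv_eq_zero_of_lt hr hrp]
    ring
  rw [show q = p + (q - p) from by omega, ← ediv_pow_pow, h1]
  congr 2
  omega

-- two nonnegative numbers below 10^p with equal digits are equal
theorem digits_determine (p : Nat) : ∀ (a b : Int), 0 ≤ a → a < 10 ^ p → 0 ≤ b → b < 10 ^ p →
    (∀ j, j < p → a / 10 ^ j % 10 = b / 10 ^ j % 10) → a = b := by
  induction p with
  | zero => intro a b h1 h2 h3 h4 _; simp at h2 h4; omega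
  | succ p ih =>
    intro a b h1 h2 h3 h4 hd
    have h0 := hd 0 (by omega)
    simp at h0
    have key : a / 10 = b / 10 := by
      apply ih
      · positivity
      · rw [pow_succ] at h2
        omega
      · positivity
      · rw [pow_succ] at h4
        omega
      · intro j hj
        rw [ediv_ten_pow, ediv_ten_pow]
        exact hd (j + 1) (by omega)
    omega

-- digit j of revSpec m t is digit (m-1-j) of t
theorem dig_revSpec (m : Nat) : ∀ (t : Int) (j : Nat), 0 ≤ t → j < m →
    revSpec m t / 10 ^ j % 10 = t / 10 ^ (m - 1 - j) % 10 := by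
  induction m with
  | zero => intro t j _ hj; omega
  | succ m ih =>
    intro t j ht hj
    rw [revSpec_cons]
    have hr0 : 0 ≤ revSpec m (t / 10) := revSpec_nonneg m _ (by positivity)
    have hrl : revSpec m (t / 10) < 10 ^ m := revSpec_lt m _ (by positivity)
    rcases Nat.lt_or_ge j m with hjm | hjm
    · rw [dig_low _ _ m j hjm, ih (t / 10) j (by positivity) hjm, ediv_ten_pow]
      rw [show m - 1 - j + 1 = m + 1 - 1 - j from by omega]
    · have hjm' : j = m := by omega
      have h1 : ((t % 10) * 10 ^ m + revSpec m (t / 10)) / 10 ^ j = t % 10 := by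
        rw [hjm', div_high _ _ m m hr0 hrl (le_refl m)]
        simp
      rw [h1, show m + 1 - 1 - j = 0 from by omega]
      simp [Int.emod_emod_of_dvd]


-- (10^m - 1) / 10^j = 10^(m-j) - 1 for j ≤ m
theorem nines_div (m j : Nat) (hj : j ≤ m) : ((10:Int) ^ m - 1) / 10 ^ j = 10 ^ (m - j) - 1 := by
  have h : (10:Int) ^ m - 1 = (10 ^ (m - j) - 1) * 10 ^ j + (10 ^ j - 1) := by
    rw [sub_mul, one_mul, ← pow_add]
    rw [show m - j + j = m from by omega]
    ring
  have h1 : (1:Int) ≤ 10 ^ j := one_le_pow₀ (by norm_num)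
  rw [h, add_comm, Int.add_mul_ediv_right _ _ (by positivity : (10:Int) ^ j ≠ 0),
      Int.ediv_eq_zero_of_lt (by omega) (by omega)]
  ring

theorem dig_nines (m j : Nat) (hj : j < m) : ((10:Int) ^ m - 1) / 10 ^ j % 10 = 9 := by
  rw [nines_div m j (by omega)]
  have h : (10:Int) ^ (m - j) - 1 = (10 ^ (m - j - 1) - 1) * 10 + 9 := by
    rw [sub_mul, one_mul, ← pow_succ]
    rw [show m - j - 1 + 1 = m - j from by omega]
    ring
  omega

-- reversing all-nines gives all-nines
theorem revSpec_nines (m : Nat) : revSpec m ((10:Int) ^ m - 1) = 10 ^ m - 1 := by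
  have h1 : (1:Int) ≤ 10 ^ m := one_le_pow₀ (by norm_num)
  apply digits_determine m
  · exact revSpec_nonneg _ _ (by omega)
  · exact revSpec_lt _ _ (by omega)
  · omega
  · omega
  · intro j hj
    rw [dig_revSpec m _ j (by omega) hj, dig_nines m j hj, dig_nines m (m - 1 - j) (by omega)]

-- incrementing a number whose last digit is not 9 bumps the high digit of the reversal
theorem revSpec_succ_last (m : Nat) (h : Int) (hm : 1 ≤ m) (_h0 : 0 ≤ h) (h9 : h % 10 ≠ 9) :
    revSpec m (h + 1) = revSpec m h + 10 ^ (m - 1) := by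
  obtain ⟨m', rfl⟩ : ∃ m', m = m' + 1 := ⟨m - 1, by omega⟩
  rw [revSpec_cons, revSpec_cons]
  have e1 : (h + 1) % 10 = h % 10 + 1 := by omega
  have e2 : (h + 1) / 10 = h / 10 := by omega
  rw [e1, e2]
  simp only [Nat.add_sub_cancel]
  ring

-- pvFloorLog10 is the digit count minus one on [10^d, 10^(d+1))
theorem pvFloorLog10_eq (d : Nat) : ∀ x : Int, 10 ^ d ≤ x → x < 10 ^ (d + 1) →
    pvFloorLog10 x = d := by
  induction d with
  | zero =>
    intro x h1 h2
    rw [pvFloorLog10]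
    simp at h1 h2 ⊢
    omega
  | succ d ih =>
    intro x h1 h2
    have hx10 : ¬ x < 10 := by
      have : (10:Int) ^ 1 ≤ 10 ^ (d + 1) := pow_le_pow_right₀ (by norm_num) (by omega)
      simp at this
      omega
    rw [pvFloorLog10, dif_neg hx10, PySem.Int.floordiv_eq_ediv_of_pos (by norm_num)]
    rw [ih (x / 10) ?_ ?_]
    · push_cast
      ring
    · rw [pow_succ] at h1
      omega
    · rw [pow_succ] at h2
      omega

theorem pvDigits_eq (d : Nat) : ∀ x : Int, 10 ^ d ≤ x → x < 10 ^ (d + 1) →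
    pvDigits x = d + 1 := by
  induction d with
  | zero =>
    intro x h1 h2
    rw [pvDigits]
    simp at h1 h2 ⊢
    omega
  | succ d ih =>
    intro x h1 h2
    have hx10 : ¬ x < 10 := by
      have : (10:Int) ^ 1 ≤ 10 ^ (d + 1) := pow_le_pow_right₀ (by norm_num) (by omega)
      simp at this
      omega
    rw [pvDigits, dif_neg hx10, PySem.Int.floordiv_eq_ediv_of_pos (by norm_num)]
    rw [ih (x / 10) ?_ ?_]
    · push_cast
      ring
    · rw [pow_succ] at h1
      omega
    · rw [pow_succ] at h2
      omega

-- every positive integer lies in some decade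
theorem exists_decade (x : Int) (hx : 1 ≤ x) : ∃ d : Nat, 10 ^ d ≤ x ∧ x < 10 ^ (d + 1) := by
  obtain ⟨n, rfl⟩ : ∃ n : Nat, x = (n : Int) := ⟨x.toNat, by omega⟩
  induction n using Nat.strong_induction_on with
  | _ n ih =>
    rcases Nat.lt_or_ge n 10 with h10 | h10
    · exact ⟨0, by push_cast at hx ⊢; simp; omega⟩
    · obtain ⟨d, hd1, hd2⟩ := ih (n / 10) (by omega) (by push_cast; omega)
      refine ⟨d + 1, ?_, ?_⟩
      · rw [pow_succ]
        push_cast at hd1 ⊢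
        omega
      · rw [pow_succ]
        push_cast at hd2 ⊢
        omega



-- the (r, t) fold of pvPal in closed form
theorem pal_fold (mN : Nat) (r t : Int) :
    (List.range mN).foldl
      (fun (rt : Int × Int) _ => (rt.1 * 10 + PySem.Int.mod rt.2 10, PySem.Int.floordiv rt.2 10))
      (r, t)
    = (r * 10 ^ mN + revSpec mN t, t / 10 ^ mN) := by
  induction mN with
  | zero => simp [revSpec]
  | succ mN ih =>
    rw [List.range_succ, List.foldl_append, ih]
    simp only [List.foldl_cons, List.foldl_nil,
      PySem.Int.mod_eq_emod_of_pos (show (0:Int) < 10 from by norm_num),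
      PySem.Int.floordiv_eq_ediv_of_pos (show (0:Int) < 10 from by norm_num)]
    simp only [Prod.mk.injEq]
    constructor
    · show (r * 10 ^ mN + revSpec mN t) * 10 + t / 10 ^ mN % 10 = r * 10 ^ (mN + 1) + revSpec (mN + 1) t
      rw [revSpec, pow_succ]
      ring
    · show t / 10 ^ mN / 10 = t / 10 ^ (mN + 1)
      rw [Int.ediv_ediv_eq_ediv_mul (by positivity), ← pow_succ]

-- pvPal in closed form (n = d + 1 digits)
theorem pvPal_eq (d : Nat) (h : Int) :
    pvPal h (((d + 1 : Nat)) : Int)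
      = h * 10 ^ ((d + 1) / 2) + revSpec ((d + 1) / 2) (h / 10 ^ ((d + 1) % 2)) := by
  have e1 : (PySem.Int.mod (((d + 1 : Nat)) : Int) 2).toNat = (d + 1) % 2 := by
    rw [PySem.Int.mod_eq_emod_of_pos (by norm_num)]
    omega
  have e2 : (PySem.Int.floordiv (((d + 1 : Nat)) : Int) 2).toNat = (d + 1) / 2 := by
    rw [PySem.Int.floordiv_eq_ediv_of_pos (by norm_num)]
    omega
  rw [pvPal]
  simp only [e1, e2, pal_fold,
    PySem.Int.floordiv_eq_ediv_of_pos (show (0:Int) < 10 ^ ((d+1) % 2) from by positivity)]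
  ring

-- reversal of the top digits of z, built least-significant first
def topRev (z : Int) (d : Nat) : Nat → Int
  | 0 => 0
  | j + 1 => topRev z d j + (z / 10 ^ (d - j) % 10) * 10 ^ j

theorem topRev_eq_revSpec (z : Int) (d : Nat) :
    ∀ j, j ≤ d + 1 → topRev z d j = revSpec j (z / 10 ^ (d + 1 - j)) := by
  intro j
  induction j with
  | zero => simp [topRev, revSpec]
  | succ j ih =>
    intro hj
    have hdj : d + 1 - (j + 1) = d - j := by omega
    rw [topRev, ih (by omega), hdj, revSpec_cons]
    have e1 : z / 10 ^ (d - j) / 10 = z / 10 ^ (d + 1 - j) := by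
      rw [Int.ediv_ediv_eq_ediv_mul (by positivity), ← pow_succ,
          show d - j + 1 = d + 1 - j from by omega]
    rw [e1]
    ring

theorem topRev_nonneg (z : Int) (d : Nat) (hz : 0 ≤ z) (j : Nat) (hj : j ≤ d + 1) :
    0 ≤ topRev z d j := by
  rw [topRev_eq_revSpec z d j hj]
  exact revSpec_nonneg _ _ (by positivity)

theorem topRev_lt (z : Int) (d : Nat) (hz : 0 ≤ z) (j : Nat) (hj : j ≤ d + 1) :
    topRev z d j < 10 ^ j := by
  rw [topRev_eq_revSpec z d j hj]
  exact revSpec_lt _ _ (by positivity)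

-- the copy_to_right fold in closed form, step by step
theorem ctr_fold (d : Nat) (z : Int) (hd : 1 ≤ d) (hz0 : 0 ≤ z) (_hz : z < 10 ^ (d + 1)) :
    ∀ j, j ≤ (d + 1) / 2 →
    (List.range j).foldl
      (fun acc (k : Nat) =>
        let acc := acc - PySem.Int.mod (PySem.Int.floordiv acc (10 ^ ((k : Int)).toNat)) 10 * 10 ^ ((k : Int)).toNat
        acc + PySem.Int.mod (PySem.Int.floordiv acc (10 ^ ((((d + 1 : Nat)) : Int) - 1 - ((k : Int))).toNat)) 10 * 10 ^ ((k : Int)).toNat)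
      z
    = (z / 10 ^ j) * 10 ^ j + topRev z d j := by
  intro j
  induction j with
  | zero => simp [topRev]
  | succ j ih =>
    intro hj
    rw [List.range_succ, List.foldl_append, ih (by omega)]
    simp only [List.foldl_cons, List.foldl_nil]
    have hjd : j + 1 + (d - j - (j + 1)) = d - j := by omega
    have htn : ((j : Int)).toNat = j := by simp
    have htn2 : ((((d + 1 : Nat)) : Int) - 1 - ((j : Int))).toNat = d - j := by
      push_cast
      omega
    have hT0 : 0 ≤ topRev z d j := topRev_nonneg z d hz0 j (by omega)
    have hTl : topRev z d j < 10 ^ j := topRev_lt z d hz0 j (by omega)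
    -- digit j of the accumulator is digit j of z
    have hacc_div : ((z / 10 ^ j) * 10 ^ j + topRev z d j) / 10 ^ j = z / 10 ^ j := by
      rw [div_high _ _ j j hT0 hTl (le_refl j)]
      simp
    -- removing digit j leaves the (j+1)-truncation of z plus the reversal so far
    have hmid : (z / 10 ^ j) * 10 ^ j + topRev z d j - z / 10 ^ j % 10 * 10 ^ j
        = (z / 10 ^ (j + 1)) * 10 ^ (j + 1) + topRev z d j := by
      have h1 : z / 10 ^ j = (z / 10 ^ (j + 1)) * 10 + z / 10 ^ j % 10 := by
        rw [show z / 10 ^ (j + 1) = z / 10 ^ j / 10 from by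
          rw [Int.ediv_ediv_eq_ediv_mul (by positivity), ← pow_succ]]
        omega
      rw [pow_succ] at h1 ⊢
      linear_combination (10:Int) ^ j * h1
    -- digit (d - j) of the partially rewritten accumulator is digit (d - j) of z
    have hhigh : ((z / 10 ^ (j + 1)) * 10 ^ (j + 1) + topRev z d j) / 10 ^ (d - j) = z / 10 ^ (d - j) := by
      rw [div_high _ _ (j + 1) (d - j) hT0 (lt_trans hTl (by
            exact pow_lt_pow_right₀ (by norm_num) (by omega))) (by omega)]
      rw [ediv_pow_pow, hjd]
    simp only [PySem.Int.mod_eq_emod_of_pos (show (0:Int) < 10 from by norm_num),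
      PySem.Int.floordiv_eq_ediv_of_pos (show (0:Int) < 10 ^ j from by positivity),
      htn, htn2]
    rw [PySem.Int.floordiv_eq_ediv_of_pos (show (0:Int) < 10 ^ (d - j) from by positivity)]
    rw [hacc_div, hmid, hhigh, topRev]
    ring

-- copy_to_right = mirror of the left half (including the middle digit)
theorem ctr_eq (d : Nat) (z : Int) (hd : 1 ≤ d) (hz0 : 0 ≤ z) (hz : z < 10 ^ (d + 1)) :
    pvCopyToRight (((d + 1 : Nat)) : Int) ((((d + 1) / 2 : Nat)) : Int) z
      = pvPal (z / 10 ^ ((d + 1) / 2)) (((d + 1 : Nat)) : Int) := by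
  rw [pvCopyToRight, PySem.List.pyRange_zero_natCast, List.foldl_map]
  rw [ctr_fold d z hd hz0 hz ((d + 1) / 2) (le_refl _), pvPal_eq, topRev_eq_revSpec z d _ (by omega)]
  have e1 : z / 10 ^ ((d + 1) / 2) / 10 ^ ((d + 1) % 2) = z / 10 ^ (d + 1 - (d + 1) / 2) := by
    rw [ediv_pow_pow]
    congr 2
    omega
  rw [e1]


theorem ipLoop_stop (x L R : Int) (h : L < R) : pvIpLoop x L R = true := by
  rw [pvIpLoop, dif_neg (by omega)]

-- one unfolding of the while-loop of is_palindromic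
theorem ipLoop_unfold (x : Int) (a b : Nat) (hba : b ≤ a) :
    pvIpLoop x (10 ^ a) (10 ^ b)
      = if x / 10 ^ a % 10 = x / 10 ^ b % 10 then pvIpLoop x (10 ^ a / 10) (10 ^ (b + 1)) else false := by
  rw [pvIpLoop, dif_pos ⟨one_le_pow₀ (by norm_num), pow_le_pow_right₀ (by norm_num) hba⟩]
  simp only [PySem.Int.mod_eq_emod_of_pos (show (0:Int) < 10 from by norm_num),
    PySem.Int.floordiv_eq_ediv_of_pos (show (0:Int) < 10 ^ a from by positivity),
    PySem.Int.floordiv_eq_ediv_of_pos (show (0:Int) < 10 ^ b from by positivity),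
    PySem.Int.floordiv_eq_ediv_of_pos (show (0:Int) < 10 from by norm_num), pow_succ]
  by_cases h : x / 10 ^ a % 10 = x / 10 ^ b % 10
  · rw [if_neg (by omega), if_pos h]
  · rw [if_pos (by omega), if_neg h]

-- what the while-loop decides: all symmetric digit pairs between positions b and b+k agree
theorem ipLoop_char (x : Int) : ∀ (k b : Nat),
    (pvIpLoop x (10 ^ (b + k)) (10 ^ b) = true ↔
     ∀ i j : Nat, b ≤ i → i ≤ j → i + j = 2 * b + k → x / 10 ^ j % 10 = x / 10 ^ i % 10) := by
  intro k
  induction k using Nat.strong_induction_on with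
  | _ k ih =>
    intro b
    rw [ipLoop_unfold x (b + k) b (by omega)]
    by_cases hc : x / 10 ^ (b + k) % 10 = x / 10 ^ b % 10
    · rw [if_pos hc]
      match k with
      | 0 =>
        rw [ipLoop_stop x _ _ (by
          have h1 : (10:Int) ^ (b + 0) / 10 ≤ 10 ^ b := by
            have := Int.ediv_le_self (10:Int) (show (0:Int) ≤ 10 ^ (b + 0) from by positivity)
            simpa using Int.ediv_le_self 10 (show (0:Int) ≤ 10 ^ (b + 0) from by positivity)
          have h2 : (10:Int) ^ b < 10 ^ (b + 1) := pow_lt_pow_right₀ (by norm_num) (by omega)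
          omega)]
        constructor
        · intro _ i j hbi hij hsum
          have h : i = b ∧ j = b := by omega
          rw [h.1, h.2]
        · intro _; rfl
      | 1 =>
        rw [show b + 1 = (b + 0) + 1 from by omega, pow_succ,
            Int.mul_ediv_cancel _ (by norm_num : (10:Int) ≠ 0)]
        rw [ipLoop_stop x _ _ (by
          have h1 : (1:Int) ≤ 10 ^ b := one_le_pow₀ (by norm_num)
          omega)]
        constructor
        · intro _ i j hbi hij hsum
          have h : i = b ∧ j = b + 1 := by omega
          rw [h.1, h.2]
          exact hc
        · intro _; rfl
      | k'' + 2 =>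
        rw [show b + (k'' + 2) = (b + (k'' + 1)) + 1 from by omega, pow_succ,
            Int.mul_ediv_cancel _ (by norm_num : (10:Int) ≠ 0),
            show b + (k'' + 1) = (b + 1) + k'' from by omega]
        rw [ih k'' (by omega) (b + 1)]
        constructor
        · intro h i j hbi hij hsum
          rcases Nat.eq_or_lt_of_le hbi with hib | hib
          · have hj : j = b + (k'' + 2) := by omega
            rw [hj, ← hib]
            exact hc
          · exact h i j (by omega) hij (by omega)
        · intro h i j hbi hij hsum
          exact h i j (by omega) hij (by omega)
    · rw [if_neg hc]
      constructor
      · intro h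
        exact absurd h (by simp)
      · intro h
        exact absurd (h b (b + k) (le_refl b) (by omega) (by omega)) hc


-- is_palindromic on a (d+1)-digit number, d ≥ 1: all symmetric digit pairs agree
theorem is_pal_pairs (d : Nat) (x : Int) (hd : 1 ≤ d) (h1 : 10 ^ d ≤ x) (h2 : x < 10 ^ (d + 1)) :
    (is_palindromic x = true ↔
      ∀ i j : Nat, i ≤ j → i + j = d → x / 10 ^ j % 10 = x / 10 ^ i % 10) := by
  have hx0 : (0:Int) < x := lt_of_lt_of_le (by positivity) h1
  have hx10 : ¬ (0 ≤ x ∧ x < 10) := by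
    have : (10:Int) ^ 1 ≤ 10 ^ d := pow_le_pow_right₀ (by norm_num) (by omega)
    simp at this
    omega
  rw [is_palindromic, if_neg (by omega), if_neg hx10, pvFloorLog10_eq d x h1 h2]
  rw [show ((d:Int)).toNat = d from by simp]
  rw [show (1:Int) = 10 ^ 0 from by norm_num, show d = 0 + d from by omega]
  rw [ipLoop_char x d 0]
  constructor
  · intro h i j hij hsum
    exact h i j (by omega) hij (by omega)
  · intro h i j _ hij hsum
    exact h i j hij (by omega)

-- the pair condition says: the low half of x mirrors its left half
theorem pairs_iff_mirror (d : Nat) (x : Int) (hx0 : 0 ≤ x) :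
    ((∀ i j : Nat, i ≤ j → i + j = d → x / 10 ^ j % 10 = x / 10 ^ i % 10) ↔
      x % 10 ^ ((d + 1) / 2) = revSpec ((d + 1) / 2) (x / 10 ^ (d + 1 - (d + 1) / 2))) := by
  have hm0 : 0 ≤ x % 10 ^ ((d + 1) / 2) := Int.emod_nonneg _ (by positivity)
  have hml : x % 10 ^ ((d + 1) / 2) < 10 ^ ((d + 1) / 2) := Int.emod_lt_of_pos _ (by positivity)
  have ht0 : (0:Int) ≤ x / 10 ^ (d + 1 - (d + 1) / 2) := by positivity
  have hsplit : (x / 10 ^ ((d + 1) / 2)) * 10 ^ ((d + 1) / 2) + x % 10 ^ ((d + 1) / 2) = x := by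
    have h := Int.ediv_add_emod x (10 ^ ((d + 1) / 2))
    linarith
  -- digit j of the low part is digit j of x, for j below the half length
  have hlow : ∀ j : Nat, j < (d + 1) / 2 →
      x % 10 ^ ((d + 1) / 2) / 10 ^ j % 10 = x / 10 ^ j % 10 := by
    intro j hj
    conv_rhs => rw [← hsplit]
    rw [dig_low _ _ _ _ hj]
  -- digit j of the mirrored left half is digit (d - j) of x
  have hrev : ∀ j : Nat, j < (d + 1) / 2 →
      revSpec ((d + 1) / 2) (x / 10 ^ (d + 1 - (d + 1) / 2)) / 10 ^ j % 10 = x / 10 ^ (d - j) % 10 := by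
    intro j hj
    rw [dig_revSpec _ _ j ht0 hj, ediv_pow_pow,
      show d + 1 - (d + 1) / 2 + ((d + 1) / 2 - 1 - j) = d - j from by omega]
  constructor
  · intro h
    apply digits_determine ((d + 1) / 2) _ _ hm0 hml
      (revSpec_nonneg _ _ ht0) (revSpec_lt _ _ ht0)
    intro j hj
    rw [hlow j hj, hrev j hj]
    exact (h j (d - j) (by omega) (by omega)).symm
  · intro h i j hij hsum
    rcases Nat.eq_or_lt_of_le hij with rfl | hlt
    · rfl
    · have him : i < (d + 1) / 2 := by omega
      have heq := hlow i him
      rw [h, hrev i him] at heq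
      rw [show j = d - i from by omega]
      exact heq


theorem cast_succ_nat (d : Nat) : ((d:Int)) + 1 = (((d + 1 : Nat)) : Int) := by push_cast; ring

theorem floordiv_cast_two (a : Nat) : PySem.Int.floordiv ((a : Int)) 2 = (((a / 2 : Nat)) : Int) := by
  exact_mod_cast PySem.Int.floordiv_natCast a 2

theorem floordiv_cast_two_toNat (a : Nat) : (PySem.Int.floordiv ((a : Int)) 2).toNat = a / 2 := by
  rw [floordiv_cast_two]; omega

theorem pvPal_one (h : Int) : pvPal h 1 = h := by
  rw [pvPal, show (1:Int) = ((1:Nat):Int) from by norm_num, floordiv_cast_two]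
  simp

-- B evaluated on a (d+1)-digit number: mirror, then possibly increment the half and mirror again
theorem alt_eval (d : Nat) (x : Int) (h9 : 9 ≤ x) (hd1 : 10 ^ d ≤ x) (hd2 : x < 10 ^ (d + 1)) :
    next_palindromic_alt x =
      if pvPal (x / 10 ^ ((d + 1) / 2)) (((d + 1 : Nat)) : Int) > x then
        pvPal (x / 10 ^ ((d + 1) / 2)) (((d + 1 : Nat)) : Int)
      else if x / 10 ^ ((d + 1) / 2) + 1 = 10 ^ (d + 1 - (d + 1) / 2) then 10 ^ (d + 1) + 1
      else pvPal (x / 10 ^ ((d + 1) / 2) + 1) (((d + 1 : Nat)) : Int) := by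
  rw [next_palindromic_alt, if_neg (by omega : ¬ x < 0), pvDigits_eq d x hd1 hd2]
  simp only [floordiv_cast_two_toNat, cast_succ_nat,
    PySem.Int.floordiv_eq_ediv_of_pos (show (0:Int) < 10 ^ ((d + 1) / 2) from by positivity)]
  rw [show (d + 1 + 1) / 2 = d + 1 - (d + 1) / 2 from by omega,
      show (((d + 1 : Nat) : Int)).toNat = d + 1 from by simp]

-- A's float test floor(log10(x+1)) == log10(x+1) recognises exactly the all-nines numbers
theorem case1_iff (d : Nat) (x : Int) (hd1 : 10 ^ d ≤ x) (hd2 : x < 10 ^ (d + 1)) :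
    ((10:Int) ^ (pvFloorLog10 (x + 1)).toNat = x + 1 ↔ x = 10 ^ (d + 1) - 1) := by
  by_cases hx : x = 10 ^ (d + 1) - 1
  · subst hx
    rw [show (10:Int) ^ (d + 1) - 1 + 1 = 10 ^ (d + 1) from by ring,
        pvFloorLog10_eq (d + 1) _ (le_refl _) (pow_lt_pow_right₀ (by norm_num) (by omega))]
    simp
  · have hb1 : 10 ^ d ≤ x + 1 := by omega
    have hb2 : x + 1 < 10 ^ (d + 1) := by omega
    rw [pvFloorLog10_eq d _ hb1 hb2, show (((d:Int))).toNat = d from by simp]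
    constructor
    · intro h
      omega
    · intro h
      exact absurd h hx

-- ===== VERDICT (by name: the statement is the Claim_ definition above) =====
theorem next_palindromic_spec : Claim_equal_next_palindromic := by
  intro x _
  show next_palindromic x = next_palindromic_alt x
  by_cases h9 : x < 9
  · rw [next_palindromic, if_pos h9, next_palindromic_alt]
    by_cases hneg : x < 0
    · rw [if_pos hneg, max_eq_left (by omega : x ≤ -1)]
      ring
    · rw [if_neg hneg]
      have e : pvDigits x = 1 := by rw [pvDigits, dif_pos (by omega : x < 10)]
      simp only [e, show PySem.Int.floordiv 1 2 = 0 from by decide, Int.toNat_zero, pow_zero,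
        PySem.Int.floordiv_eq_ediv_of_pos (show (0:Int) < 1 from by norm_num), Int.ediv_one,
        pvPal_one, show PySem.Int.floordiv (1 + 1) 2 = 1 from by decide]
      rw [if_neg (lt_irrefl x), if_neg (by norm_num; omega : ¬ x + 1 = 10 ^ ((1:Int)).toNat),
          max_eq_right (by omega : (-1:Int) ≤ x)]
  · have hx9 : (9:Int) ≤ x := by omega
    obtain ⟨d, hd1, hd2⟩ := exists_decade x (by omega)
    rcases Nat.eq_zero_or_pos d with hd0 | hdpos
    · subst hd0
      have hx : x = 9 := by norm_num at hd1 hd2; omega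
      subst hx
      rw [next_palindromic, if_neg (by norm_num), show (9:Int) + 1 = 10 from by norm_num,
          pvFloorLog10_eq 1 10 (by norm_num) (by norm_num),
          alt_eval 0 9 (by norm_num) (by norm_num) (by norm_num)]
      norm_num [pvPal_one]
    · -- d ≥ 1: both sides reduce to mirror / increment-and-mirror of the left half
      have hmk : (d + 1) / 2 + (d + 1 - (d + 1) / 2) = d + 1 := by omega
      have hek : (d + 1) / 2 + (d + 1) % 2 = d + 1 - (d + 1) / 2 := by omega
      have hmN1 : 1 ≤ (d + 1) / 2 := by omega
      have hpowpos : (0:Int) < 10 ^ ((d + 1) / 2) := by positivity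
      have hkpos : (0:Int) < 10 ^ (d + 1 - (d + 1) / 2) := by positivity
      have hpowmul : (10:Int) ^ (d + 1 - (d + 1) / 2) * 10 ^ ((d + 1) / 2) = 10 ^ (d + 1) := by
        rw [← pow_add, show d + 1 - (d + 1) / 2 + (d + 1) / 2 = d + 1 from by omega]
      have hx0 : (0:Int) ≤ x := by omega
      have hh0 : (0:Int) ≤ x / 10 ^ ((d + 1) / 2) := by positivity
      have hhlt : x / 10 ^ ((d + 1) / 2) < 10 ^ (d + 1 - (d + 1) / 2) := by
        rw [Int.ediv_lt_iff_lt_mul hpowpos]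
        rw [hpowmul]
        exact hd2
      have hsplit : (x / 10 ^ ((d + 1) / 2)) * 10 ^ ((d + 1) / 2) + x % 10 ^ ((d + 1) / 2) = x := by
        have h := Int.ediv_add_emod x (10 ^ ((d + 1) / 2))
        linarith
      have hl0 : 0 ≤ x % 10 ^ ((d + 1) / 2) := Int.emod_nonneg _ (by positivity)
      have hll : x % 10 ^ ((d + 1) / 2) < 10 ^ ((d + 1) / 2) := Int.emod_lt_of_pos _ hpowpos
      have hrtop : (x / 10 ^ ((d + 1) / 2)) / 10 ^ ((d + 1) % 2) = x / 10 ^ (d + 1 - (d + 1) / 2) := by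
        rw [ediv_pow_pow, hek]
      have hr0 : 0 ≤ revSpec ((d + 1) / 2) (x / 10 ^ (d + 1 - (d + 1) / 2)) :=
        revSpec_nonneg _ _ (by positivity)
      have hrl : revSpec ((d + 1) / 2) (x / 10 ^ (d + 1 - (d + 1) / 2)) < 10 ^ ((d + 1) / 2) :=
        revSpec_lt _ _ (by positivity)
      have hpal_eval : pvPal (x / 10 ^ ((d + 1) / 2)) (((d + 1 : Nat)) : Int)
          = (x / 10 ^ ((d + 1) / 2)) * 10 ^ ((d + 1) / 2)
            + revSpec ((d + 1) / 2) (x / 10 ^ (d + 1 - (d + 1) / 2)) := by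
        rw [pvPal_eq, hrtop]
      -- the all-nines left half would make x all nines
      have hnines_half : ∀ hq : x / 10 ^ ((d + 1) / 2) = 10 ^ (d + 1 - (d + 1) / 2) - 1,
          revSpec ((d + 1) / 2) (x / 10 ^ (d + 1 - (d + 1) / 2)) = 10 ^ ((d + 1) / 2) - 1 := by
        intro hq
        rw [← hrtop, hq, nines_div _ _ (by omega),
            show d + 1 - (d + 1) / 2 - (d + 1) % 2 = (d + 1) / 2 from by omega, revSpec_nines]
      rw [next_palindromic, if_neg (by omega : ¬ x < 9), alt_eval d x hx9 hd1 hd2]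
      by_cases hnines : x = 10 ^ (d + 1) - 1
      · rw [if_pos ((case1_iff d x hd1 hd2).mpr hnines)]
        have hhval : x / 10 ^ ((d + 1) / 2) = 10 ^ (d + 1 - (d + 1) / 2) - 1 := by
          rw [hnines, ← hpowmul,
              show (10:Int) ^ (d + 1 - (d + 1) / 2) * 10 ^ ((d + 1) / 2) - 1
                = (10 ^ (d + 1 - (d + 1) / 2) - 1) * 10 ^ ((d + 1) / 2) + (10 ^ ((d + 1) / 2) - 1)
                from by ring,
              add_comm, Int.add_mul_ediv_right _ _ (ne_of_gt hpowpos),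
              Int.ediv_eq_zero_of_lt (by omega) (by omega)]
          ring
        have hcand : pvPal (x / 10 ^ ((d + 1) / 2)) (((d + 1 : Nat)) : Int) = x := by
          rw [hpal_eval, hhval, hnines_half hhval, hnines]
          linear_combination hpowmul
        rw [if_neg (by rw [hcand]; exact lt_irrefl x), if_pos (by rw [hhval]; ring), hnines]
        ring
      · rw [if_neg (fun hcond => hnines ((case1_iff d x hd1 hd2).mp hcond)),
            pvFloorLog10_eq d x hd1 hd2]
        simp only [cast_succ_nat d, floordiv_cast_two (d + 1),
          show ((((((d + 1)) / 2 : Nat)) : Int)).toNat = (d + 1) / 2 from by omega]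
        have hpal_iff := (is_pal_pairs d x hdpos hd1 hd2).trans (pairs_iff_mirror d x hx0)
        -- x' / 10^m = half + 1
        have hx'div : (x + 10 ^ ((d + 1) / 2)) / 10 ^ ((d + 1) / 2) = x / 10 ^ ((d + 1) / 2) + 1 := by
          conv_lhs => rw [← hsplit]
          rw [show (x / 10 ^ ((d + 1) / 2)) * 10 ^ ((d + 1) / 2) + x % 10 ^ ((d + 1) / 2)
                + 10 ^ ((d + 1) / 2)
              = (x / 10 ^ ((d + 1) / 2) + 1) * 10 ^ ((d + 1) / 2) + x % 10 ^ ((d + 1) / 2)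
              from by ring,
              div_high _ _ ((d + 1) / 2) ((d + 1) / 2) hl0 hll (le_refl _)]
          simp
        by_cases hpal : is_palindromic x = true
        · have hlr := hpal_iff.mp hpal
          rw [if_pos hpal]
          have hxeq : x = (x / 10 ^ ((d + 1) / 2)) * 10 ^ ((d + 1) / 2)
              + revSpec ((d + 1) / 2) (x / 10 ^ (d + 1 - (d + 1) / 2)) := by
            rw [← hlr]
            exact hsplit.symm
          have hcand : pvPal (x / 10 ^ ((d + 1) / 2)) (((d + 1 : Nat)) : Int) = x := by
            rw [hpal_eval, ← hxeq]
          have hne : x / 10 ^ ((d + 1) / 2) ≠ 10 ^ (d + 1 - (d + 1) / 2) - 1 := by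
            intro hc
            apply hnines
            rw [hxeq, hnines_half hc, hc]
            linear_combination hpowmul
          have hx'0 : (0:Int) ≤ x + 10 ^ ((d + 1) / 2) := by omega
          have hx'lt : x + 10 ^ ((d + 1) / 2) < 10 ^ (d + 1) := by
            have hh2 : x / 10 ^ ((d + 1) / 2) ≤ 10 ^ (d + 1 - (d + 1) / 2) - 2 := by omega
            nlinarith [hsplit, hll, hpowpos, hpowmul]
          rw [PySem.Int.floordiv_eq_ediv_of_pos hpowpos, hx'div,
              PySem.Int.mod_eq_emod_of_pos (show (0:Int) < 10 from by norm_num)]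
          by_cases hcar : (x / 10 ^ ((d + 1) / 2) + 1) % 10 = 0
          · rw [if_pos hcar, ctr_eq d _ hdpos hx'0 hx'lt, hx'div,
                if_neg (by rw [hcand]; exact lt_irrefl x),
                if_neg (fun hc => hne (by omega))]
          · rw [if_neg hcar]
            have hB : (if pvPal (x / 10 ^ ((d + 1) / 2)) (((d + 1 : Nat)) : Int) > x then
                  pvPal (x / 10 ^ ((d + 1) / 2)) (((d + 1 : Nat)) : Int)
                else if x / 10 ^ ((d + 1) / 2) + 1 = 10 ^ (d + 1 - (d + 1) / 2) then 10 ^ (d + 1) + 1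
                else pvPal (x / 10 ^ ((d + 1) / 2) + 1) (((d + 1 : Nat)) : Int))
                = pvPal (x / 10 ^ ((d + 1) / 2) + 1) (((d + 1 : Nat)) : Int) := by
              rw [if_neg (by rw [hcand]; exact lt_irrefl x), if_neg (fun hc => hne (by omega))]
            rw [hB, pvPal_eq]
            have hmod2 : PySem.Int.mod (((d + 1 : Nat)) : Int) 2 = ((((d + 1) % 2 : Nat)) : Int) := by
              exact_mod_cast PySem.Int.mod_natCast (d + 1) 2
            by_cases hev : (d + 1) % 2 = 0
            · rw [if_pos (by rw [hmod2, hev]; norm_num)]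
              rw [show ((((((d + 1)) / 2 : Nat)) : Int) - 1).toNat = (d + 1) / 2 - 1 from by omega]
              rw [hev, pow_zero, Int.ediv_one,
                  revSpec_succ_last ((d + 1) / 2) _ hmN1 hh0 (by omega)]
              have hrw : revSpec ((d + 1) / 2) (x / 10 ^ ((d + 1) / 2))
                  = revSpec ((d + 1) / 2) (x / 10 ^ (d + 1 - (d + 1) / 2)) := by
                rw [← hrtop, hev, pow_zero, Int.ediv_one]
              rw [hrw]
              linear_combination hxeq
            · rw [if_neg (by rw [hmod2]; intro hc; exact hev (by exact_mod_cast hc))]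
              have hodd : (d + 1) % 2 = 1 := by omega
              rw [hodd, pow_one]
              have hdiv10 : (x / 10 ^ ((d + 1) / 2) + 1) / 10 = x / 10 ^ ((d + 1) / 2) / 10 := by
                omega
              have hrw : x / 10 ^ ((d + 1) / 2) / 10 = x / 10 ^ (d + 1 - (d + 1) / 2) := by
                rw [← hrtop, hodd, pow_one]
              rw [hdiv10, hrw]
              linear_combination hxeq
        · rw [if_neg hpal, ctr_eq d x hdpos hx0 hd2]
          have hlr : x % 10 ^ ((d + 1) / 2)
              ≠ revSpec ((d + 1) / 2) (x / 10 ^ (d + 1 - (d + 1) / 2)) :=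
            fun h => hpal (hpal_iff.mpr h)
          by_cases hgt : pvPal (x / 10 ^ ((d + 1) / 2)) (((d + 1 : Nat)) : Int) > x
          · rw [if_pos hgt, if_pos hgt]
          · rw [if_neg hgt, if_neg hgt]
            have hrltl : revSpec ((d + 1) / 2) (x / 10 ^ (d + 1 - (d + 1) / 2))
                < x % 10 ^ ((d + 1) / 2) := by
              rw [hpal_eval] at hgt
              omega
            have hne : x / 10 ^ ((d + 1) / 2) ≠ 10 ^ (d + 1 - (d + 1) / 2) - 1 := by
              intro hc
              have := hnines_half hc
              omega
            have hx'0 : (0:Int) ≤ x + 10 ^ ((d + 1) / 2) := by omega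
            have hx'lt : x + 10 ^ ((d + 1) / 2) < 10 ^ (d + 1) := by
              have hh2 : x / 10 ^ ((d + 1) / 2) ≤ 10 ^ (d + 1 - (d + 1) / 2) - 2 := by omega
              nlinarith [hsplit, hll, hpowpos, hpowmul]
            rw [ctr_eq d _ hdpos hx'0 hx'lt, hx'div, if_neg (fun hc => hne (by omega))]
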